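-- pv_equiv track=rewrite | github.com/Alp830/Turkish_Community_Center_Agent | code/spreadsheet_tool.py | _condition_points
-- ===== SOURCE A (Python) =====
-- from typing import Any, Iterable, Tuple
--
-- def _condition_points(text: str) -> Tuple[int, list[str]]:
--     """
--     Facility condition/capex points.
--     Higher = more likely deal (needs work / deferred maintenance).
--     Returns (points, matched_signals).
--     """
--     poor = ["falling apart", "dilapidated", "deferred maintenance", "needs renovation", "needs repairs", "poor condition"]
--     fair = ["fair", "dated", "older building", "needs updates", "outdated"]
--     good = ["good", "well maintained", "well-maintained", "good condition"]
--     excellent = ["excellent", "newly renovated", "recently renovated", "fully renovated", "strong community"]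
--
--     matched: list[str] = []
--     if any(k in text for k in poor):
--         matched += [k for k in poor if k in text]
--         return 2, matched
--     if any(k in text for k in fair):
--         matched += [k for k in fair if k in text]
--         return 1, matched
--     if any(k in text for k in good):
--         matched += [k for k in good if k in text]
--         return -1, matched
--     if any(k in text for k in excellent):
--         matched += [k for k in excellent if k in text]
--         return -2, matched
--     return 0, matched
-- ===== SOURCE B (Python) =====
-- # Collect-then-select: one flat (points, keyword) table, a single pass collecting
-- # ALL matches, then select the maximum-points group. Correct because tier
-- # priority (poor>fair>good>excellent) is exactly descending points order and
-- # the flat table preserves each tier's keyword order.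
-- _KEYWORD_POINTS = [
--     (2, "falling apart"), (2, "dilapidated"), (2, "deferred maintenance"),
--     (2, "needs renovation"), (2, "needs repairs"), (2, "poor condition"),
--     (1, "fair"), (1, "dated"), (1, "older building"), (1, "needs updates"), (1, "outdated"),
--     (-1, "good"), (-1, "well maintained"), (-1, "well-maintained"), (-1, "good condition"),
--     (-2, "excellent"), (-2, "newly renovated"), (-2, "recently renovated"),
--     (-2, "fully renovated"), (-2, "strong community"),
-- ]
--
-- def _condition_points(text: str):
--     hits = [(p, k) for p, k in _KEYWORD_POINTS if k in text]
--     if not hits: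
--         return 0, []
--     best = max(p for p, _ in hits)
--     return best, [k for p, k in hits if p == best]
-- ===== Notes on version B (the rewrite author's own statement) =====
-- stated objective: alternative
-- what changed: Instead of four prioritized if-blocks each scanning its own tier with early return, B makes ONE pass over a flat (points, keyword) table collecting all matches across all tiers, then selects the maximum-points group (priority equals descending points), returning that score and its keywords.
import Mathlib
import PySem

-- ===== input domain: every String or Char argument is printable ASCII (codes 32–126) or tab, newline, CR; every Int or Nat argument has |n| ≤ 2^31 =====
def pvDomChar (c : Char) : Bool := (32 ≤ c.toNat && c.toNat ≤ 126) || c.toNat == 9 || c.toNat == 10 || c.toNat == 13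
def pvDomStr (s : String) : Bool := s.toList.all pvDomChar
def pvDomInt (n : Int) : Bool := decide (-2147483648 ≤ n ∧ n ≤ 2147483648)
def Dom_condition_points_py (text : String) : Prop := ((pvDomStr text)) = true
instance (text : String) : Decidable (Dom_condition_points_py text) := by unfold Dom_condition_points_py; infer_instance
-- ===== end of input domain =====

-- B replaces A's four prioritized if-blocks by a single pass collecting all keyword matches and selecting the max-points group (alternative decomposition; same cost).


-- ===== PORT A =====
def poorA : List String := ["falling apart", "dilapidated", "deferred maintenance", "needs renovation", "needs repairs", "poor condition"]
def fairA : List String := ["fair", "dated", "older building", "needs updates", "outdated"]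
def goodA : List String := ["good", "well maintained", "well-maintained", "good condition"]
def excellentA : List String := ["excellent", "newly renovated", "recently renovated", "fully renovated", "strong community"]

def condition_points_py (text : String) : Int × List String :=
  let matched : List String := []
  if poorA.any (fun k => PySem.Str.isIn k text) then
    (2, matched ++ poorA.filter (fun k => PySem.Str.isIn k text))
  else if fairA.any (fun k => PySem.Str.isIn k text) then
    (1, matched ++ fairA.filter (fun k => PySem.Str.isIn k text))
  else if goodA.any (fun k => PySem.Str.isIn k text) then
    (-1, matched ++ goodA.filter (fun k => PySem.Str.isIn k text))
  else if excellentA.any (fun k => PySem.Str.isIn k text) then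
    (-2, matched ++ excellentA.filter (fun k => PySem.Str.isIn k text))
  else (0, matched)

-- ===== PORT B =====
def kwPointsB : List (Int × String) :=
  [(2, "falling apart"), (2, "dilapidated"), (2, "deferred maintenance"),
   (2, "needs renovation"), (2, "needs repairs"), (2, "poor condition"),
   (1, "fair"), (1, "dated"), (1, "older building"), (1, "needs updates"), (1, "outdated"),
   (-1, "good"), (-1, "well maintained"), (-1, "well-maintained"), (-1, "good condition"),
   (-2, "excellent"), (-2, "newly renovated"), (-2, "recently renovated"),
   (-2, "fully renovated"), (-2, "strong community")]

def condition_points_py_alt (text : String) : Int × List String :=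
  let hits := kwPointsB.filter (fun pk => PySem.Str.isIn pk.2 text)
  if hits.isEmpty then (0, [])
  else
    match PySem.List.max? (hits.map Prod.fst) (fun x => x) with
    | none => (0, [])      -- unreachable: hits is non-empty here
    | some best => (best, (hits.filter (fun pk => pk.1 == best)).map Prod.snd)

-- ===== PRECONDITION & SPEC =====
def Spec_condition_points_py (text : String) (out : Int × List String) : Prop := out = condition_points_py_alt text
instance (text : String) (out : Int × List String) : Decidable (Spec_condition_points_py text out) := by unfold Spec_condition_points_py; infer_instance

-- ===== CLAIM (what is proved, stated in full; the proofs are below) =====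
def Claim_equal_condition_points_py : Prop := ∀ (text : String), Dom_condition_points_py text → Spec_condition_points_py text (condition_points_py text)

-- ===== LEMMAS AND PROOFS =====

-- proof-only helper: the select phase of B (identical shape to B's body after the filter)
def selectB (hits : List (Int × String)) : Int × List String :=
  if hits.isEmpty then (0, [])
  else
    match PySem.List.max? (hits.map Prod.fst) (fun x => x) with
    | none => (0, [])
    | some best => (best, (hits.filter (fun pk => pk.1 == best)).map Prod.snd)

theorem alt_eq_selectB (text : String) :
    condition_points_py_alt text = selectB (kwPointsB.filter (fun pk => PySem.Str.isIn pk.2 text)) := rfl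

-- the flat table is the four tiers tagged with their points, in order
theorem kwPointsB_split :
    kwPointsB = poorA.map (fun s => ((2 : Int), s)) ++ fairA.map (fun s => ((1 : Int), s))
      ++ goodA.map (fun s => ((-1 : Int), s)) ++ excellentA.map (fun s => ((-2 : Int), s)) := by
  rfl

theorem filter_kwPointsB (text : String) :
    kwPointsB.filter (fun pk => PySem.Str.isIn pk.2 text)
      = (poorA.filter (fun k => PySem.Str.isIn k text)).map (fun s => ((2 : Int), s))
        ++ (fairA.filter (fun k => PySem.Str.isIn k text)).map (fun s => ((1 : Int), s))
        ++ (goodA.filter (fun k => PySem.Str.isIn k text)).map (fun s => ((-1 : Int), s))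
        ++ (excellentA.filter (fun k => PySem.Str.isIn k text)).map (fun s => ((-2 : Int), s)) := by
  rw [kwPointsB_split]
  simp only [List.filter_append, List.filter_map]
  rfl

theorem filter_eq_nil_iff_not_any {α : Type} (p : α → Bool) (l : List α) :
    (l.filter p = []) ↔ (l.any p = false) := by
  induction l with
  | nil => simp
  | cons a t ih => by_cases h : p a <;> simp [h, ih]

theorem any_of_filter_ne_nil {α : Type} {p : α → Bool} {l : List α}
    (h : l.filter p ≠ []) : l.any p = true := by
  cases hh : l.any p with
  | false => exact absurd ((filter_eq_nil_iff_not_any p l).mpr hh) h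
  | true => rfl

theorem max?_id_eq_of_mem_of_le (l : List Int) (a : Int)
    (hmem : a ∈ l) (hle : ∀ x ∈ l, x ≤ a) :
    PySem.List.max? l (fun x => x) = some a := by
  cases h : PySem.List.max? l (fun x => x) with
  | none =>
    rw [PySem.List.max?_eq_none_iff] at h
    subst h; simp at hmem
  | some m =>
    have hm : m ∈ l := PySem.List.max?_mem h
    have h1 : m ≤ a := hle m hm
    have h2 : a ≤ m := PySem.List.max?_isMax h a hmem
    simp only [Option.some.injEq]
    omega

-- B's collect-then-select on the tagged concatenation returns (c, mᵢ) for the first non-empty tier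
theorem selectB_spec (m1 m2 m3 m4 : List String) (c : Int) (res : List String)
    (hc : (c = 2 ∧ res = m1 ∧ m1 ≠ []) ∨
          (c = 1 ∧ res = m2 ∧ m1 = [] ∧ m2 ≠ []) ∨
          (c = -1 ∧ res = m3 ∧ m1 = [] ∧ m2 = [] ∧ m3 ≠ []) ∨
          (c = -2 ∧ res = m4 ∧ m1 = [] ∧ m2 = [] ∧ m3 = [] ∧ m4 ≠ [])) :
    selectB (m1.map (fun s => ((2 : Int), s)) ++ m2.map (fun s => ((1 : Int), s))
        ++ m3.map (fun s => ((-1 : Int), s)) ++ m4.map (fun s => ((-2 : Int), s))) = (c, res) := by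
  set hits := m1.map (fun s => ((2 : Int), s)) ++ m2.map (fun s => ((1 : Int), s))
      ++ m3.map (fun s => ((-1 : Int), s)) ++ m4.map (fun s => ((-2 : Int), s)) with hhits
  have hcmem : c ∈ hits.map Prod.fst := by
    have hres : res ≠ [] ∧ (res = m1 ∧ c = 2 ∨ res = m2 ∧ c = 1 ∨ res = m3 ∧ c = -1 ∨ res = m4 ∧ c = -2) := by
      rcases hc with ⟨h, h', h''⟩ | ⟨h, h', _, h''⟩ | ⟨h, h', _, _, h''⟩ | ⟨h, h', _, _, _, h''⟩ <;>
        subst h <;> subst h' <;> simp_all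
    obtain ⟨a, ha⟩ := List.exists_mem_of_ne_nil _ hres.1
    rcases hres.2 with ⟨h, h'⟩ | ⟨h, h'⟩ | ⟨h, h'⟩ | ⟨h, h'⟩ <;> subst h <;> subst h' <;>
      simp [hhits, List.mem_map, List.mem_append] <;> tauto
  have hle : ∀ x ∈ hits.map Prod.fst, x ≤ c := by
    intro x hx
    have hx' : x = 2 ∧ m1 ≠ [] ∨ x = 1 ∧ m2 ≠ [] ∨ x = -1 ∧ m3 ≠ [] ∨ x = -2 ∧ m4 ≠ [] := by
      simp only [hhits, List.map_append, List.map_map, List.mem_append, List.mem_map,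
        Function.comp_def] at hx
      rcases hx with ((⟨a, ha, h⟩ | ⟨a, ha, h⟩) | ⟨a, ha, h⟩) | ⟨a, ha, h⟩
      · exact Or.inl ⟨h.symm, List.ne_nil_of_mem ha⟩
      · exact Or.inr (Or.inl ⟨h.symm, List.ne_nil_of_mem ha⟩)
      · exact Or.inr (Or.inr (Or.inl ⟨h.symm, List.ne_nil_of_mem ha⟩))
      · exact Or.inr (Or.inr (Or.inr ⟨h.symm, List.ne_nil_of_mem ha⟩))
    rcases hc with ⟨h, _, _⟩ | ⟨h, _, e1, _⟩ | ⟨h, _, e1, e2, _⟩ | ⟨h, _, e1, e2, e3, _⟩ <;>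
      subst h <;> rcases hx' with ⟨h, he⟩ | ⟨h, he⟩ | ⟨h, he⟩ | ⟨h, he⟩ <;> subst h <;>
      first | omega | (exfalso; simp_all)
  have hne : hits.isEmpty = false := by
    have hn : hits ≠ [] := by
      intro h
      rw [h] at hcmem; simp at hcmem
    simpa [List.isEmpty_iff] using hn
  unfold selectB
  rw [hne]
  simp only [Bool.false_eq_true, if_false]
  rw [max?_id_eq_of_mem_of_le _ c hcmem hle]
  simp only [hhits, List.filter_append, List.filter_map, Function.comp_def]
  rcases hc with ⟨h, h', _⟩ | ⟨h, h', e1, _⟩ | ⟨h, h', e1, e2, _⟩ | ⟨h, h', e1, e2, e3, _⟩ <;>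
    subst h <;> subst h' <;> simp_all

-- ===== VERDICT (by name: the statement is the Claim_ definition above) =====
theorem condition_points_py_spec : Claim_equal_condition_points_py := by
  intro text _
  unfold Spec_condition_points_py condition_points_py
  rw [alt_eq_selectB, filter_kwPointsB]
  simp only [List.nil_append]
  by_cases h1 : poorA.filter (fun k => PySem.Str.isIn k text) = []
  · have ha1 : poorA.any (fun k => PySem.Str.isIn k text) = false :=
      (filter_eq_nil_iff_not_any _ _).mp h1
    by_cases h2 : fairA.filter (fun k => PySem.Str.isIn k text) = []
    · have ha2 : fairA.any (fun k => PySem.Str.isIn k text) = false :=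
        (filter_eq_nil_iff_not_any _ _).mp h2
      by_cases h3 : goodA.filter (fun k => PySem.Str.isIn k text) = []
      · have ha3 : goodA.any (fun k => PySem.Str.isIn k text) = false :=
          (filter_eq_nil_iff_not_any _ _).mp h3
        by_cases h4 : excellentA.filter (fun k => PySem.Str.isIn k text) = []
        · have ha4 : excellentA.any (fun k => PySem.Str.isIn k text) = false :=
            (filter_eq_nil_iff_not_any _ _).mp h4
          rw [h1, h2, h3, h4]
          simp only [ha1, ha2, ha3, ha4, Bool.false_eq_true, if_false, List.map_nil,
            List.append_nil]
          rfl
        · simp only [ha1, ha2, ha3, any_of_filter_ne_nil h4, Bool.false_eq_true, if_false, if_true]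
          exact (selectB_spec _ _ _ _ (-2) _ (Or.inr (Or.inr (Or.inr ⟨rfl, rfl, h1, h2, h3, h4⟩)))).symm
      · simp only [ha1, ha2, any_of_filter_ne_nil h3, Bool.false_eq_true, if_false, if_true]
        exact (selectB_spec _ _ _ _ (-1) _ (Or.inr (Or.inr (Or.inl ⟨rfl, rfl, h1, h2, h3⟩)))).symm
    · simp only [ha1, any_of_filter_ne_nil h2, Bool.false_eq_true, if_false, if_true]
      exact (selectB_spec _ _ _ _ 1 _ (Or.inr (Or.inl ⟨rfl, rfl, h1, h2⟩))).symm
  · rw [if_pos (any_of_filter_ne_nil h1)]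
    exact (selectB_spec _ _ _ _ 2 _ (Or.inl ⟨rfl, rfl, h1⟩)).symm
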